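-- pv_equiv track=rewrite | github.com/SeoHyungjun/Coding_Test | programmers/2020카카오블라인드채용/괄호변환/괄호변환.py | check_str
-- ===== SOURCE A (Python) =====
-- def check_str(string):
--     left = 0
--     right = 0
--     index = -1
--     balance = True
--
--     for i in range(len(string)):
--         if string[i] == '(':
--             left += 1
--         else:
--             right += 1
--
--         if right == left and index == -1:
--             index = i
--
--         if right > left:
--             balance = False
--
--     return index, balance
-- ===== SOURCE B (Python) =====
-- def check_str(string):
--     # Build the full prefix-balance table once, then answer the two
--     # questions with separate queries over it.
--     pre = []
--     s = 0
--     for ch in string: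
--         s += 1 if ch == '(' else -1
--         pre.append(s)
--     index = next((i for i, v in enumerate(pre) if v == 0), -1)
--     balance = all(v >= 0 for v in pre)
--     return index, balance
-- ===== Notes on version B (the rewrite author's own statement) =====
-- stated objective: alternative
-- what changed: B first materialises the prefix-balance table (+1 for an opening parenthesis, -1 otherwise) and then derives the two results by two independent queries over it (first zero position, all-nonnegative), instead of A's single loop threading four state variables.
import Mathlib
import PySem

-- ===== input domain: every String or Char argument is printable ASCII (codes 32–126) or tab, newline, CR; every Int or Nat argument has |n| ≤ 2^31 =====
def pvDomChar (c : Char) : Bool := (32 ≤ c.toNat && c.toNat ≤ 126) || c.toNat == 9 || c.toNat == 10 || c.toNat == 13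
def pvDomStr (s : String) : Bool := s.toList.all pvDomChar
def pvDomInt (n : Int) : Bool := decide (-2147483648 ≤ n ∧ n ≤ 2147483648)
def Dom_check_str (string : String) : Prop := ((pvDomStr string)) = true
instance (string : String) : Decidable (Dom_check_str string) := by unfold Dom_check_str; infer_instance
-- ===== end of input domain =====

-- B replaces A's single four-variable loop by a prefix-sum table queried twice; objective: alternative decomposition.

-- ===== PORT A =====
-- the for-loop of A: one pass carrying left, right, index, balance (i is the position counter)
def check_str_go : List Char → Nat → Int → Int → Int → Bool → Int × Bool
  | [], _, _, _, index, balance => (index, balance)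
  | c :: rest, i, left, right, index, balance =>
    let left' := if c = '(' then left + 1 else left
    let right' := if c = '(' then right else right + 1
    let index' := if right' = left' ∧ index = -1 then (i : Int) else index
    let balance' := if right' > left' then false else balance
    check_str_go rest (i + 1) left' right' index' balance'

def check_str (string : String) : Int × Bool :=
  check_str_go string.toList 0 0 0 (-1) true

-- ===== PORT B =====
-- running prefix sums: +1 for '(', -1 otherwise
def pvPrefixSums : List Char → Int → List Int
  | [], _ => []
  | c :: rest, s =>
    let s' := s + (if c = '(' then 1 else -1)
    s' :: pvPrefixSums rest s'

def check_str_alt (string : String) : Int × Bool :=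
  let pre := pvPrefixSums string.toList 0
  let index : Int :=
    match pre.findIdx? (fun v => v = 0) with
    | some i => (i : Int)
    | none => -1
  (index, pre.all (fun v => decide (0 ≤ v)))

-- ===== PRECONDITION & SPEC =====
def Spec_check_str (string : String) (out : Int × Bool) : Prop := out = check_str_alt string
instance (string : String) (out : Int × Bool) : Decidable (Spec_check_str string out) := by unfold Spec_check_str; infer_instance

-- ===== CLAIM (what is proved, stated in full; the proofs are below) =====
def Claim_equal_check_str : Prop := ∀ (string : String), Dom_check_str string → Spec_check_str string (check_str string)

-- ===== LEMMAS AND PROOFS =====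

theorem check_str_go_eq (cs : List Char) : ∀ (k : Nat) (left right index : Int) (balance : Bool),
    check_str_go cs k left right index balance =
      ((match (pvPrefixSums cs (left - right)).findIdx? (fun v => decide (v = 0)) with
        | some i => if index = -1 then ((k : Int) + i) else index
        | none => index),
       balance && (pvPrefixSums cs (left - right)).all (fun v => decide (0 ≤ v))) := by
  induction cs with
  | nil =>
    intro k left right index balance
    simp [check_str_go, pvPrefixSums]
  | cons c rest ih =>
    intro k left right index balance
    simp only [check_str_go]
    rw [ih]
    have haux : (if c = '(' then left + 1 else left) - (if c = '(' then right else right + 1)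
        = left - right + (if c = '(' then (1 : Int) else -1) := by split_ifs <;> ring
    rw [haux]
    simp only [pvPrefixSums]
    set a : Int := left - right + (if c = '(' then (1 : Int) else -1) with ha
    rw [List.findIdx?_cons]
    by_cases h0 : a = 0
    · -- the new prefix sum is zero: right' = left'
      have heq : (if c = '(' then right else right + 1) = (if c = '(' then left + 1 else left) := by
        split_ifs at ha ⊢ <;> omega
      have hk : ((k : Int)) ≠ -1 := by omega
      rw [h0]
      cases hfi : List.findIdx? (fun v => decide (v = 0)) (pvPrefixSums rest 0) <;>
        by_cases hi : index = -1 <;>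
          simp [heq, hfi, hi, hk]
    · -- the new prefix sum is nonzero: right' ≠ left'
      have hne : (if c = '(' then right else right + 1) ≠ (if c = '(' then left + 1 else left) := by
        split_ifs at ha ⊢ <;> omega
      have hgt : ((if c = '(' then right else right + 1) > if c = '(' then left + 1 else left) ↔ a < 0 := by
        split_ifs at ha ⊢ <;> omega
      rcases lt_or_gt_of_ne h0 with hlt | hgt'
      · cases hfi : List.findIdx? (fun v => decide (v = 0)) (pvPrefixSums rest a) <;>
          by_cases hi : index = -1 <;>
            simp [h0, hne, hgt, hfi, hi, hlt, show decide (0 ≤ a) = false by simp only [decide_eq_false_iff_not]; omega] <;>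
              first | omega | (push_cast; ring)
      · have h1 : ¬ a < 0 := by omega
        cases hfi : List.findIdx? (fun v => decide (v = 0)) (pvPrefixSums rest a) <;>
          by_cases hi : index = -1 <;>
            simp [h0, hne, hgt, hfi, hi, h1, show decide (0 ≤ a) = true by simp only [decide_eq_true_eq]; omega] <;>
              first | omega | (push_cast; ring)

theorem check_str_spec : Claim_equal_check_str := by
  intro string _
  unfold Spec_check_str check_str check_str_alt
  rw [check_str_go_eq]
  norm_num
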